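-- pv_equiv track=rewrite | github.com/mulugeta-89/leet_code_problems | EthiopianMultiplication.py | ethiop
-- ===== SOURCE A (Python) =====
-- def ethiop(a,b):
--     a_arr = []
--     b_arr = []
--     new_arr = []
--     while a > 1:
--         a = a//2
--         a_arr.append(a)
--     for item in a_arr:
--         b = b*2
--         b_arr.append(b)
--     for idx,item in enumerate(a_arr):
--         if item%2!=0:
--             new_arr.append(b_arr[idx])
--     return sum(new_arr)
-- ===== SOURCE B (Python) =====
-- def ethiop(a, b):
--     # Single-pass Ethiopian-multiplication loop: running accumulator instead of
--     # building a_arr/b_arr and re-scanning them by index.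
--     result = 0
--     mult = b
--     while a > 1:
--         a //= 2
--         mult *= 2
--         if a % 2 != 0:
--             result += mult
--     return result
-- ===== Notes on version B (the rewrite author's own statement) =====
-- stated objective: simpler
-- what changed: Fuses A's three passes (build halving list, build doubling list, index-aligned filtered scan plus sum) into one while-loop with a running accumulator, eliminating both intermediate lists.
import Mathlib
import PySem

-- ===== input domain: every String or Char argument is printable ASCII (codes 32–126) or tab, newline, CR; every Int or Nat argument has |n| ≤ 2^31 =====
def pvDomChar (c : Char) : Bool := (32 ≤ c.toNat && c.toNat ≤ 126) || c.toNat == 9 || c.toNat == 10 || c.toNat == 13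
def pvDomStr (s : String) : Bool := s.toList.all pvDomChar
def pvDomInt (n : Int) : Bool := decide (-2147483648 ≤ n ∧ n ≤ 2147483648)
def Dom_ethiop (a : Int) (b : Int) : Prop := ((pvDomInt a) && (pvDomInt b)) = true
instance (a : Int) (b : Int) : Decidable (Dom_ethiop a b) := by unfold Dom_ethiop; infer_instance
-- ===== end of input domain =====

-- B fuses A's three passes (halving list, doubling list, index-aligned filtered sum)
-- into one while-loop with a running accumulator; same value everywhere (objective: simpler).


-- ===== PORT A =====
-- while a > 1: a = a//2; a_arr.append(a)
def ethiopALoop (a : Int) : List Int :=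
  if _h : a > 1 then
    PySem.Int.floordiv a 2 :: ethiopALoop (PySem.Int.floordiv a 2)
  else []
termination_by a.toNat
decreasing_by
  rw [PySem.Int.floordiv_eq_ediv_of_pos (by omega)]; omega

-- for item in a_arr: b = b*2; b_arr.append(b)
def ethiopBLoop (a_arr : List Int) (b : Int) : List Int :=
  match a_arr with
  | [] => []
  | _ :: t => (b * 2) :: ethiopBLoop t (b * 2)

-- for idx,item in enumerate(a_arr): if item%2!=0: new_arr.append(b_arr[idx])
-- (b_arr[idx] is always in range, so the .getD 0 default is never used)
def ethiopNewLoop (b_arr : List Int) (ps : List (Int × Int)) (new_arr : List Int) : List Int :=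
  ps.foldl (fun acc p =>
    if PySem.Int.mod p.2 2 ≠ 0 then acc ++ [(PySem.List.pyGet? b_arr p.1).getD 0]
    else acc) new_arr

def ethiop (a : Int) (b : Int) : Int :=
  let a_arr := ethiopALoop a
  let b_arr := ethiopBLoop a_arr b
  (ethiopNewLoop b_arr (PySem.List.enumerate a_arr) []).sum

-- ===== PORT B =====
-- result = 0; mult = b; while a > 1: a //= 2; mult *= 2; if a % 2 != 0: result += mult
def ethiopAltGo (a : Int) (mult : Int) (result : Int) : Int :=
  if _h : a > 1 then
    let a' := PySem.Int.floordiv a 2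
    let mult' := mult * 2
    ethiopAltGo a' mult' (if PySem.Int.mod a' 2 ≠ 0 then result + mult' else result)
  else result
termination_by a.toNat
decreasing_by
  rw [PySem.Int.floordiv_eq_ediv_of_pos (by omega)]; omega

def ethiop_alt (a : Int) (b : Int) : Int := ethiopAltGo a b 0

-- ===== PRECONDITION & SPEC =====
def Spec_ethiop (a : Int) (b : Int) (out : Int) : Prop := out = ethiop_alt a b
instance (a : Int) (b : Int) (out : Int) : Decidable (Spec_ethiop a b out) := by unfold Spec_ethiop; infer_instance

-- ===== CLAIM (what is proved, stated in full; the proofs are below) =====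
def Claim_equal_ethiop : Prop := ∀ (a : Int) (b : Int), Dom_ethiop a b → Spec_ethiop a b (ethiop a b)

-- ===== LEMMAS AND PROOFS =====

-- the value A's third loop contributes, written as one structural recursion
def ethiopSLoop (l : List Int) (bcur : Int) : Int :=
  match l with
  | [] => 0
  | x :: t => (if PySem.Int.mod x 2 ≠ 0 then bcur * 2 else 0) + ethiopSLoop t (bcur * 2)

lemma ethiopNewLoop_sum (l : List Int) : ∀ (m : List Int) (k : Nat) (bcur : Int) (acc : List Int),
    m.drop k = ethiopBLoop l bcur →
    (ethiopNewLoop m (PySem.List.enumerate l (k : Int)) acc).sum = acc.sum + ethiopSLoop l bcur := by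
  induction l with
  | nil => intro m k bcur acc _; simp [ethiopNewLoop, ethiopSLoop]
  | cons x t ih =>
    intro m k bcur acc h
    have hk : m[k]? = some (bcur * 2) := by
      have := congrArg List.head? h
      simpa [List.head?_drop, ethiopBLoop] using this
    have hdrop : m.drop (k + 1) = ethiopBLoop t (bcur * 2) := by
      have := congrArg List.tail h
      rw [List.tail_drop] at this
      simpa [ethiopBLoop] using this
    simp only [ethiopNewLoop] at ih ⊢
    rw [PySem.List.enumerate_cons, List.foldl_cons,
        show ((k : Int) + 1) = ((k + 1 : Nat) : Int) by push_cast; ring,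
        ih m (k + 1) (bcur * 2) _ hdrop]
    simp only [ethiopSLoop, PySem.List.pyGet?_natCast, hk, Option.getD_some]
    split_ifs <;> first
      | (simp; ring)
      | simp

lemma ethiopAltGo_eq (n : Nat) : ∀ (a mult result : Int), a.toNat ≤ n →
    ethiopAltGo a mult result = result + ethiopSLoop (ethiopALoop a) mult := by
  induction n with
  | zero =>
    intro a mult result hn
    rw [ethiopAltGo, ethiopALoop]
    have : ¬ a > 1 := by omega
    simp [this, ethiopSLoop]
  | succ n ih =>
    intro a mult result hn
    rw [ethiopAltGo, ethiopALoop]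
    by_cases h : a > 1
    · simp only [h, dif_pos]
      rw [ih _ _ _ (by rw [PySem.Int.floordiv_eq_ediv_of_pos (by omega)]; omega)]
      simp only [ethiopSLoop]
      split_ifs <;> ring
    · simp [h, ethiopSLoop]

-- ===== VERDICT (by name: the statement is the Claim_ definition above) =====
theorem ethiop_spec : Claim_equal_ethiop := by
  intro a b _
  show ethiop a b = ethiop_alt a b
  unfold ethiop ethiop_alt
  have h1 := ethiopNewLoop_sum (ethiopALoop a) (ethiopBLoop (ethiopALoop a) b) 0 b [] (by simp)
  have h2 := ethiopAltGo_eq a.toNat a b 0 (le_refl _)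
  simp only [Nat.cast_zero] at h1
  simp only [h1, h2, List.sum_nil, zero_add]
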